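-- pv_equiv track=rewrite | github.com/kevinkim-dev/self_study | programmers/2018kakaoblind/level1_비밀지도.py | solution
-- ===== SOURCE A (Python) =====
-- def solution(n, arr1, arr2):
--     answer = []
--     key = [' ', '#']
--     for _ in range(n):
--         ans = ''
--         a, b = arr1.pop(0), arr2.pop(0)
--         bi = a | b
--         for _ in range(n):
--             ans = key[bi % 2] + ans
--             bi //= 2
--         answer.append(ans)
--     return answer
-- ===== SOURCE B (Python) =====
-- def solution(n, arr1, arr2):
--     # Pass 1: consume the inputs (same n pops from each list as A), OR-ing the pairs.
--     vals = [arr1.pop(0) | arr2.pop(0) for _ in range(n)]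
--     # Pass 2: transposed loop nest -- build ALL n rows simultaneously, one
--     # bit-column per iteration, prepending a column of characters each step.
--     rows = [''] * n
--     for _ in range(n):
--         rows = [('#' if v & 1 else ' ') + r for v, r in zip(vals, rows)]
--         vals = [v >> 1 for v in vals]
--     return rows
-- ===== Notes on version B (the rewrite author's own statement) =====
-- stated objective: alternative
-- what changed: B transposes A's loop nest: a first pass pops and ORs all n pairs, then a column-major loop builds all n row strings simultaneously, prepending one bit-column of characters per iteration, instead of A's row-at-a-time inner bit loop.
import Mathlib
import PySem

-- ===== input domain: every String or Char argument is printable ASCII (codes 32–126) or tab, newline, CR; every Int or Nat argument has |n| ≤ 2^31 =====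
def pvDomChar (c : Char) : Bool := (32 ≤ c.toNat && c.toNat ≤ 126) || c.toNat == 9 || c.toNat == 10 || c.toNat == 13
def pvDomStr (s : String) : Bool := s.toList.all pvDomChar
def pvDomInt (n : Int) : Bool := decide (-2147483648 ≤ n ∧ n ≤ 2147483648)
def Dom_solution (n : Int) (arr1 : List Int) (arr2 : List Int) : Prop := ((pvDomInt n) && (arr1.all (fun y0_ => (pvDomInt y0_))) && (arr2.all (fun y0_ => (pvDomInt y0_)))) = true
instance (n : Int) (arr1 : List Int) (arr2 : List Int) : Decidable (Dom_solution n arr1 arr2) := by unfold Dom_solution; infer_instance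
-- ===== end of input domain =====

-- B transposes A's loop nest: it first pops and ORs all n pairs, then builds all n row
-- strings simultaneously, prepending one bit-column of characters per iteration
-- (column-major), instead of A's row-at-a-time inner bit loop; same cost, different shape.
-- Mutation note: both Pythons pop(0) n times from arr1 and arr2 (same final list state);
-- the equivalence proved here is about the return value.

-- ===== PORT A =====
-- inner loop: for _ in range(n): ans = key[bi % 2] + ans; bi //= 2
def solRowA : Nat → Int → String → String
  | 0, _, ans => ans
  | m+1, bi, ans =>
      solRowA m (PySem.Int.floordiv bi 2)
        (((PySem.List.pyGet? [" ", "#"] (PySem.Int.mod bi 2)).getD "") ++ ans)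

-- outer loop: a, b = arr1.pop(0), arr2.pop(0); empty pop = IndexError, excluded by Pre_
def solAuxA (n : Nat) : Nat → List Int → List Int → List String
  | 0, _, _ => []
  | m+1, a :: as, b :: bs => solRowA n (PySem.Int.bor a b) "" :: solAuxA n m as bs
  | _+1, _, _ => []

def solution (n : Int) (arr1 : List Int) (arr2 : List Int) : List String :=
  solAuxA n.toNat n.toNat arr1 arr2

-- ===== PORT B =====
-- pass 1: vals = [arr1.pop(0) | arr2.pop(0) for _ in range(n)]
def valsB : Nat → List Int → List Int → List Int
  | 0, _, _ => []
  | m+1, a :: as, b :: bs => PySem.Int.bor a b :: valsB m as bs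
  | _+1, _, _ => []

-- pass 2: transposed loop — one bit-column prepended to every row per iteration;
-- Python's `v & 1` test and `v >> 1` are exact on Int via band and >>> (arithmetic shift)
def colLoop : Nat → List Int → List String → List String
  | 0, _, rows => rows
  | m+1, vals, rows =>
      colLoop m (vals.map (fun v : Int => v >>> (1:Nat)))
        (List.zipWith (fun v r => (if PySem.Int.band v 1 ≠ 0 then "#" else " ") ++ r) vals rows)

def solution_alt (n : Int) (arr1 : List Int) (arr2 : List Int) : List String :=
  colLoop n.toNat (valsB n.toNat arr1 arr2) (List.replicate n.toNat "")

-- ===== PRECONDITION & SPEC =====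
-- A pops n elements from each list; fewer elements means IndexError in both programs.
def Pre_solution (n : Int) (arr1 : List Int) (arr2 : List Int) : Prop :=
  n ≤ (arr1.length : Int) ∧ n ≤ (arr2.length : Int)
instance (n : Int) (arr1 : List Int) (arr2 : List Int) : Decidable (Pre_solution n arr1 arr2) := by
  unfold Pre_solution; infer_instance
def pvWitness_solution : Int × List Int × List Int := (2, [9, 20], [30, 1])

def Spec_solution (n : Int) (arr1 : List Int) (arr2 : List Int) (out : List String) : Prop := out = solution_alt n arr1 arr2
instance (n : Int) (arr1 : List Int) (arr2 : List Int) (out : List String) : Decidable (Spec_solution n arr1 arr2 out) := by unfold Spec_solution; infer_instance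

-- ===== CLAIM (what is proved, stated in full; the proofs are below) =====
def Claim_equal_solution : Prop := ∀ (n : Int) (arr1 : List Int) (arr2 : List Int), Dom_solution n arr1 arr2 → Pre_solution n arr1 arr2 → Spec_solution n arr1 arr2 (solution n arr1 arr2)

-- ===== LEMMAS AND PROOFS =====

-- A's key[bi % 2] is B's bit test on the current value
lemma head_char (v : Int) :
    ((PySem.List.pyGet? [" ", "#"] (PySem.Int.mod v 2)).getD "")
      = (if PySem.Int.band v 1 ≠ 0 then "#" else " ") := by
  rw [PySem.Int.band_one, PySem.Int.mod_eq_emod_of_pos (by norm_num)]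
  have h2 : v % 2 = 0 ∨ v % 2 = 1 := by omega
  rcases h2 with h | h <;> simp [h, PySem.List.pyGet?, PySem.List.pyIdx?]

lemma shift_one (v : Int) : v >>> (1:Nat) = PySem.Int.floordiv v 2 := by
  rw [Int.shiftRight_eq_div_pow, PySem.Int.floordiv_eq_ediv_of_pos (by norm_num)]
  norm_num

lemma zipWith_map_zipWith {β : Type} (f : Int → Int) (g h : Int → β → β) :
    ∀ (vs : List Int) (rs : List β),
      List.zipWith h (vs.map f) (List.zipWith g vs rs)
        = List.zipWith (fun v r => h (f v) (g v r)) vs rs := by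
  intro vs
  induction vs with
  | nil => intro rs; simp
  | cons v vs ih => intro rs; cases rs <;> simp [ih]

lemma zipWith_snd {β : Type} : ∀ (vs : List Int) (rs : List β), vs.length = rs.length →
    List.zipWith (fun _ r => r) vs rs = rs := by
  intro vs
  induction vs with
  | nil =>
      intro rs h
      have : rs = [] := List.length_eq_zero_iff.mp h.symm
      simp [this]
  | cons v vs ih =>
      intro rs h
      cases rs with
      | nil => simp at h
      | cons r rs => simp [List.zipWith]; exact ih rs (by simpa using h)

-- the column loop computes, row by row, exactly A's inner-loop accumulation
lemma colLoop_eq (m : Nat) : ∀ (vals : List Int) (rows : List String),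
    vals.length = rows.length →
    colLoop m vals rows = List.zipWith (fun v r => solRowA m v r) vals rows := by
  induction m with
  | zero =>
      intro vals rows h
      simpa [colLoop, solRowA] using (zipWith_snd vals rows h).symm
  | succ m ih =>
      intro vals rows h
      rw [colLoop, ih _ _ (by simp [h]), zipWith_map_zipWith]
      have hf : (fun (v : Int) (r : String) =>
            solRowA m (v >>> (1:Nat)) ((if PySem.Int.band v 1 ≠ 0 then "#" else " ") ++ r))
          = (fun (v : Int) (r : String) => solRowA (m+1) v r) := by
        funext v r
        rw [solRowA, head_char, shift_one]
      rw [hf]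

lemma aux_eq (n : Nat) : ∀ (m : Nat) (xs ys : List Int), m ≤ xs.length → m ≤ ys.length →
    solAuxA n m xs ys
      = List.zipWith (fun v r => solRowA n v r) (valsB m xs ys) (List.replicate m "") := by
  intro m
  induction m with
  | zero => intro xs ys _ _; rfl
  | succ m ih =>
      intro xs ys hx hy
      cases xs with
      | nil => simp at hx
      | cons a as =>
          cases ys with
          | nil => simp at hy
          | cons b bs =>
              simp only [solAuxA, valsB, List.replicate, List.zipWith]
              exact congrArg _ (ih as bs (by simpa using hx) (by simpa using hy))

lemma valsB_length : ∀ (m : Nat) (xs ys : List Int), m ≤ xs.length → m ≤ ys.length →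
    (valsB m xs ys).length = m := by
  intro m
  induction m with
  | zero => intro xs ys _ _; rfl
  | succ m ih =>
      intro xs ys hx hy
      cases xs with
      | nil => simp at hx
      | cons a as =>
          cases ys with
          | nil => simp at hy
          | cons b bs => simp [valsB, ih as bs (by simpa using hx) (by simpa using hy)]

-- ===== VERDICT (by name: the statement is the Claim_ definition above) =====
theorem solution_spec : Claim_equal_solution := by
  intro n arr1 arr2 _ hpre
  obtain ⟨h1, h2⟩ := hpre
  have hx : n.toNat ≤ arr1.length := by omega
  have hy : n.toNat ≤ arr2.length := by omega
  unfold Spec_solution solution solution_alt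
  rw [aux_eq n.toNat n.toNat arr1 arr2 hx hy,
      colLoop_eq n.toNat _ _ (by simp [valsB_length n.toNat arr1 arr2 hx hy])]
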